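-- pv_equiv track=rewrite | github.com/NExT-ChatV/NExT-Chat | mllm/demo/demo_util.py | post_process_response
-- ===== SOURCE A (Python) =====
-- def post_process_response(response):
--     if "<at> <boxes>" not in response:
--         return response.replace("<", "&lt;").replace(">", "&gt;")
--     splits = response.split("<at> <boxes>")
--     to_concat = [f"[{i}]" for i in range(len(splits) - 1)]
--     rst = [splits[i // 2] if i % 2 == 0 else to_concat[i // 2]
--            for i in range(len(splits) + len(to_concat))]
--     rst = "".join(rst)
--     rst = rst.replace("<", "&lt;").replace(">", "&gt;")
--     return rst
-- ===== SOURCE B (Python) =====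
-- def post_process_response(response):
--     # One linear scan: walk the string once, replacing each "<at> <boxes>" marker
--     # with its index label in place, then escape < and > exactly as A does.
--     marker = "<at> <boxes>"
--     out = []
--     i = 0
--     k = 0
--     n = len(response)
--     while k < n:
--         if response.startswith(marker, k):
--             out.append(f"[{i}]")
--             i += 1
--             k += len(marker)
--         else:
--             out.append(response[k])
--             k += 1
--     return "".join(out).replace("<", "&lt;").replace(">", "&gt;")
-- ===== Notes on version B (the rewrite author's own statement) =====
-- stated objective: simpler
-- what changed: A splits the string on the marker, builds an index-label list and re-interleaves the pieces by an index/parity comprehension before joining; B does one left-to-right scan that copies characters and substitutes each marker occurrence with its running index label in place (the final HTML-escaping replaces are shared).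
import Mathlib
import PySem

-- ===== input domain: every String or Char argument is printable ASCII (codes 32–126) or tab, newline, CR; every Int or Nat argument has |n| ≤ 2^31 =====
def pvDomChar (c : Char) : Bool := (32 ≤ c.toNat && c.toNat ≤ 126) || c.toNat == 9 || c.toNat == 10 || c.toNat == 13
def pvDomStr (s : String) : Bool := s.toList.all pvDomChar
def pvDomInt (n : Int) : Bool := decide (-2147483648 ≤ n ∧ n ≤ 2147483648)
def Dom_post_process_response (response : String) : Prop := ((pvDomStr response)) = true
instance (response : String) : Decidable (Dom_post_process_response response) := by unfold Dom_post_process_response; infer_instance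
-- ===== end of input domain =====

-- B replaces A's split / interleave / index-comprehension construction by a single
-- left-to-right scan that emits each marker's index label in place (objective: simpler
-- one-pass alternative; the final HTML-escaping step is shared).

-- ===== PORT A =====
def post_process_response (response : String) : String :=
  if PySem.Str.isIn "<at> <boxes>" response = false then
    PySem.Str.replace (PySem.Str.replace response "<" "&lt;") ">" "&gt;"
  else
    -- the separator is a non-empty literal, so split? is always `some`: the getD default never fires
    let splits : List String := (PySem.Str.split? response "<at> <boxes>").getD []
    -- f"[{i}]" built from the code points of str(i) (String.ofList; exact for int i)
    let to_concat : List String :=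
      (PySem.List.pyRange 0 ((splits.length : Int) - 1) 1).map
        (fun i => String.ofList ('[' :: (PySem.Int.toChars i ++ [']'])))
    -- the comprehension's indices are always in range, so pyGet? is always `some`: the getD never fires
    let rst : List String :=
      (PySem.List.pyRange 0 ((splits.length : Int) + (to_concat.length : Int)) 1).map
        (fun i => if PySem.Int.mod i 2 = 0
          then (PySem.List.pyGet? splits (PySem.Int.floordiv i 2)).getD ""
          else (PySem.List.pyGet? to_concat (PySem.Int.floordiv i 2)).getD "")
    let rst2 := PySem.Str.join "" rst
    PySem.Str.replace (PySem.Str.replace rst2 "<" "&lt;") ">" "&gt;"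

-- ===== PORT B =====
def pvMarker : List Char := "<at> <boxes>".toList

lemma pvMarker_length : pvMarker.length = 12 := rfl

-- f"[{i}]" as code points
def pvLabel (i : Int) : List Char := '[' :: (PySem.Int.toChars i ++ [']'])

-- Source B's while-loop over the index k, as recursion over the remaining suffix response[k:]
def pvScan (i : Int) : List Char → List Char
  | [] => []
  | c :: t =>
    if PySem.Chars.startswith (c :: t) pvMarker then
      pvLabel i ++ pvScan (i + 1) ((c :: t).drop pvMarker.length)
    else
      c :: pvScan i t
termination_by l => l.length
decreasing_by
  all_goals simp [pvMarker_length]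

def post_process_response_alt (response : String) : String :=
  PySem.Str.replace (PySem.Str.replace (String.ofList (pvScan 0 response.toList)) "<" "&lt;") ">" "&gt;"

-- ===== PRECONDITION & SPEC =====
def Spec_post_process_response (response : String) (out : String) : Prop := out = post_process_response_alt response
instance (response : String) (out : String) : Decidable (Spec_post_process_response response out) := by unfold Spec_post_process_response; infer_instance

-- ===== CLAIM (what is proved, stated in full; the proofs are below) =====
def Claim_equal_post_process_response : Prop := ∀ (response : String), Dom_post_process_response response → Spec_post_process_response response (post_process_response response)

-- ===== LEMMAS AND PROOFS =====

-- structural characterisation of PySem.Chars.splitOn at separator pvMarker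
def splitR : List Char → List (List Char)
  | [] => [[]]
  | c :: t =>
    if pvMarker.isPrefixOf (c :: t) then [] :: splitR ((c :: t).drop pvMarker.length)
    else
      match splitR t with
      | [] => [[c]]      -- unreachable (splitR never returns [])
      | h :: tl => (c :: h) :: tl
termination_by l => l.length
decreasing_by
  all_goals simp [pvMarker_length]

lemma splitR_ne_nil (l : List Char) : splitR l ≠ [] := by
  rw [splitR.eq_def]
  cases l with
  | nil => simp
  | cons c t =>
    by_cases hp : pvMarker.isPrefixOf (c :: t)
    · simp [hp]
    · simp only [if_neg hp]
      rcases splitR t with _ | ⟨h, tl⟩ <;> simp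

lemma modifyHead_fun_id (l : List (List Char)) : List.modifyHead (fun x => x) l = l := by
  cases l <;> simp

lemma splitOn_go_eq (fuel : Nat) (l cur : List Char) (acc : List (List Char))
    (h : l.length ≤ fuel) :
    PySem.Chars.splitOn.go pvMarker fuel l cur acc
      = acc.reverse ++ (splitR l).modifyHead (cur.reverse ++ ·) := by
  induction fuel generalizing l cur acc with
  | zero =>
    have : l = [] := by simpa using h
    subst this
    simp [PySem.Chars.splitOn.go, splitR]
  | succ fuel ih =>
    cases l with
    | nil => simp [PySem.Chars.splitOn.go, splitR]
    | cons c t =>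
      rw [PySem.Chars.splitOn.go]
      by_cases hp : pvMarker.isPrefixOf (c :: t)
      · rw [if_pos hp, ih _ _ _ (by simp [pvMarker_length] at h ⊢; omega)]
        rw [show splitR (c :: t) = [] :: splitR ((c :: t).drop pvMarker.length) by
          rw [splitR]; rw [if_pos hp]]
        simp [modifyHead_fun_id]
      · rw [if_neg hp, ih _ _ _ (by simp at h ⊢; omega)]
        rw [show splitR (c :: t) = match splitR t with
              | [] => [[c]] | h :: tl => (c :: h) :: tl by
          rw [splitR]; rw [if_neg hp]]
        rcases hsp : splitR t with _ | ⟨hd, tl⟩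
        · exact absurd hsp (splitR_ne_nil t)
        · simp

lemma splitOn_eq (l : List Char) : PySem.Chars.splitOn l pvMarker = splitR l := by
  rw [PySem.Chars.splitOn, splitOn_go_eq _ _ _ _ (by omega)]
  rcases h : splitR l with _ | ⟨hd, tl⟩
  · exact absurd h (splitR_ne_nil l)
  · simp

-- the joined value both programs compute, with the running label counter
def catR : List (List Char) → Int → List Char
  | [], _ => []
  | [s], _ => s
  | s :: t, i => s ++ pvLabel i ++ catR t (i + 1)

lemma catR_nil (i : Int) : catR [] i = [] := rfl
lemma catR_single (s : List Char) (i : Int) : catR [s] i = s := rfl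
lemma catR_cons₂ (a b : List Char) (t : List (List Char)) (i : Int) :
    catR (a :: b :: t) i = a ++ pvLabel i ++ catR (b :: t) (i + 1) := rfl

lemma pvScan_eq_catR (l : List Char) (i : Int) : pvScan i l = catR (splitR l) i := by
  induction hn : l.length using Nat.strong_induction_on generalizing l i with
  | _ n ih =>
  subst hn
  cases l with
  | nil => simp [pvScan, splitR, catR_single]
  | cons c t =>
    rw [pvScan, splitR]
    by_cases hp : pvMarker.isPrefixOf (c :: t)
    · rw [if_pos (by simpa [PySem.Chars.startswith] using hp), if_pos hp]
      rw [ih ((c :: t).drop pvMarker.length).length (by simp [pvMarker_length]) _ _ rfl]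
      rcases h : splitR ((c :: t).drop pvMarker.length) with _ | ⟨hd, tl⟩
      · exact absurd h (splitR_ne_nil _)
      · rw [catR_cons₂]; simp
    · rw [if_neg (by simpa [PySem.Chars.startswith] using hp), if_neg hp]
      rw [ih t.length (by simp) _ _ rfl]
      rcases h : splitR t with _ | ⟨hd, tl⟩
      · exact absurd h (splitR_ne_nil t)
      · cases tl with
        | nil => simp [catR_single]
        | cons b tl' => rw [catR_cons₂, catR_cons₂]; simp

lemma scan_id (l : List Char) (i : Int) (h : ¬ pvMarker <:+: l) : pvScan i l = l := by
  induction l generalizing i with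
  | nil => simp [pvScan]
  | cons c t ih =>
    rw [pvScan]
    rw [if_neg (by
      simp only [PySem.Chars.startswith]
      intro hpre
      exact h (List.isPrefixOf_iff_prefix.mp hpre).isInfix)]
    rw [ih _ (fun hi => h (hi.trans (List.suffix_cons c t).isInfix))]

lemma catR_append (S : List (List Char)) (x : List Char) (i : Int) (hS : S ≠ []) :
    catR (S ++ [x]) i = catR S i ++ pvLabel (i + S.length - 1) ++ x := by
  induction S generalizing i with
  | nil => exact absurd rfl hS
  | cons s S ih =>
    cases S with
    | nil => simp [catR_single, catR_cons₂]
    | cons s' S' =>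
      rw [show (s :: s' :: S') ++ [x] = s :: ((s' :: S') ++ [x]) from rfl]
      rw [show ((s' :: S') ++ [x]) = s' :: (S' ++ [x]) from rfl]
      rw [catR_cons₂]
      rw [show s' :: (S' ++ [x]) = (s' :: S') ++ [x] from rfl]
      rw [ih _ (by simp)]
      rw [catR_cons₂]
      have harg : i + 1 + ((s' :: S').length : Int) - 1 = i + ((s :: s' :: S').length : Int) - 1 := by
        simp [List.length_cons]; ring
      rw [harg]
      simp [List.append_assoc]

lemma interleave_flatten (S : List (List Char)) :
    ((List.range (2 * S.length - 1)).map
      (fun k => if k % 2 = 0 then (S[k / 2]?).getD [] else pvLabel ((k / 2 : Nat) : Int))).flatten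
      = catR S 0 := by
  induction S using List.reverseRecOn with
  | nil => simp [catR_nil]
  | append_singleton S x ih =>
    by_cases hS : S = []
    · subst hS; simp [catR_single]
    · have hn : 1 ≤ S.length := by
        cases S with | nil => exact absurd rfl hS | cons _ _ => simp
      have h1 : 2 * (S ++ [x]).length - 1 = (2 * S.length - 1) + 1 + 1 := by
        simp [List.length_append]; omega
      rw [h1, List.range_succ, List.range_succ]
      have hfront : ((List.range (2 * S.length - 1)).map
          (fun k => if k % 2 = 0 then ((S ++ [x])[k / 2]?).getD [] else pvLabel ((k / 2 : Nat) : Int)))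
          = ((List.range (2 * S.length - 1)).map
          (fun k => if k % 2 = 0 then (S[k / 2]?).getD [] else pvLabel ((k / 2 : Nat) : Int))) := by
        apply List.map_congr_left
        intro k hk
        simp only [List.mem_range] at hk
        by_cases he : k % 2 = 0
        · rw [if_pos he, if_pos he, List.getElem?_append_left (by omega)]
        · rw [if_neg he, if_neg he]
      rw [List.map_append, List.map_append, List.flatten_append, List.flatten_append, hfront, ih]
      have hodd : ¬ (2 * S.length - 1) % 2 = 0 := by omega
      have hodd2 : (2 * S.length - 1) / 2 = S.length - 1 := by omega
      have heven : (2 * S.length - 1 + 1) % 2 = 0 := by omega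
      have heven2 : (2 * S.length - 1 + 1) / 2 = S.length := by omega
      rw [catR_append S x 0 hS]
      simp only [List.map_cons, List.map_nil, if_neg hodd, if_pos heven, hodd2, heven2,
        List.flatten_cons, List.flatten_nil, List.append_nil]
      rw [List.getElem?_append_right (le_refl _)]
      simp only [Nat.sub_self, List.getElem?_cons_zero, Option.getD_some]
      have hcast : ((S.length - 1 : Nat) : Int) = 0 + (S.length : Int) - 1 := by
        push_cast [Nat.cast_sub hn]; ring
      rw [hcast, List.append_assoc]

lemma toList_getD (o : Option String) : (o.getD "").toList = (o.map String.toList).getD [] := by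
  cases o <;> simp

lemma join_nil_flatten (parts : List (List Char)) : PySem.Chars.join [] parts = parts.flatten := by
  rw [PySem.Chars.join]
  simp only [List.intercalate]
  induction parts with
  | nil => simp
  | cons h t ih => cases t <;> simp_all [List.intersperse]

-- ===== VERDICT (by name: the statement is the Claim_ definition above) =====
theorem post_process_response_spec : Claim_equal_post_process_response := by
  intro s _
  show post_process_response s = post_process_response_alt s
  rw [post_process_response, post_process_response_alt]
  by_cases hin : PySem.Str.isIn "<at> <boxes>" s = false
  · rw [if_pos hin]
    have hni : ¬ pvMarker <:+: s.toList := by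
      rw [PySem.Str.isIn_eq] at hin
      exact (PySem.Chars.isIn_eq_false_iff _ _).mp hin
    rw [scan_id _ _ hni, String.ofList_toList]
  · rw [if_neg hin]
    obtain ⟨w, hw⟩ : ∃ w, PySem.Str.split? s "<at> <boxes>" = some w := by
      have h := PySem.Str.split?_map s "<at> <boxes>"
      rw [PySem.Chars.split?, if_neg (by decide)] at h
      cases ho : PySem.Str.split? s "<at> <boxes>" with
      | none => rw [ho] at h; simp at h
      | some w => exact ⟨w, rfl⟩
    have hmap : w.map String.toList = splitR s.toList := by
      have h := PySem.Str.split?_map s "<at> <boxes>"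
      rw [PySem.Chars.split?, if_neg (by decide), hw] at h
      rw [show ("<at> <boxes>".toList) = pvMarker from rfl, splitOn_eq] at h
      simpa using h
    have hn : 1 ≤ w.length := by
      rcases w with _ | ⟨a, b⟩
      · exact absurd hmap.symm (splitR_ne_nil s.toList)
      · simp
    simp only [hw, Option.getD_some]
    have hlen : ((w.length : Int) +
        ((List.map (fun i => String.ofList ('[' :: (PySem.Int.toChars i ++ [']'])))
          (PySem.List.pyRange 0 ((w.length : Int) - 1))).length : Int))
        = ((2 * w.length - 1 : Nat) : Int) := by
      simp [PySem.List.length_pyRange_one]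
      omega
    rw [hlen]
    have hS : (splitR s.toList).length = w.length := by
      rw [← hmap]; simp
    have hT : (PySem.Str.join ""
        (List.map
          (fun i =>
            if PySem.Int.mod i 2 = 0 then (PySem.List.pyGet? w (PySem.Int.floordiv i 2)).getD ""
            else
              (PySem.List.pyGet?
                    (List.map (fun i => String.ofList ('[' :: (PySem.Int.toChars i ++ [']'])))
                      (PySem.List.pyRange 0 ((w.length : Int) - 1)))
                    (PySem.Int.floordiv i 2)).getD
                "")
          (PySem.List.pyRange 0 ((2 * w.length - 1 : Nat) : Int)))).toList
        = pvScan 0 s.toList := by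
      rw [PySem.Str.toList_join, show ("" : String).toList = [] from rfl, join_nil_flatten]
      rw [pvScan_eq_catR, ← interleave_flatten (splitR s.toList), hS]
      rw [PySem.List.pyRange_zero_nat (2 * w.length - 1), List.map_map, List.map_map]
      congr 1
      apply List.map_congr_left
      intro k hk
      simp only [List.mem_range] at hk
      have hmod : PySem.Int.mod ((k : Nat) : Int) 2 = ((k % 2 : Nat) : Int) := by
        exact_mod_cast PySem.Int.mod_natCast k 2
      have hdiv : PySem.Int.floordiv ((k : Nat) : Int) 2 = ((k / 2 : Nat) : Int) := by
        exact_mod_cast PySem.Int.floordiv_natCast k 2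
      simp only [Function.comp_apply, hmod, hdiv]
      by_cases he : k % 2 = 0
      · rw [if_pos (by exact_mod_cast he), if_pos he]
        rw [PySem.List.pyGet?_natCast, toList_getD, ← List.getElem?_map, hmap]
      · rw [if_neg (by exact_mod_cast he), if_neg he]
        rw [PySem.List.pyGet?_natCast, toList_getD, List.getElem?_map,
          PySem.List.getElem?_pyRange_one]
        have ht : ((w.length : Int) - 1 - 0).toNat = w.length - 1 := by omega
        rw [ht, if_pos (by omega)]
        simp [pvLabel]
    calc PySem.Str.replace (PySem.Str.replace (PySem.Str.join "" _) "<" "&lt;") ">" "&gt;"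
        = PySem.Str.replace (PySem.Str.replace (String.ofList (pvScan 0 s.toList)) "<" "&lt;") ">" "&gt;" := by
          rw [show PySem.Str.join "" _ = String.ofList (pvScan 0 s.toList) by
            rw [← hT, String.ofList_toList]]
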